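-- pv_equiv track=rewrite | github.com/Alpha-Leporis/code | questions/HR/find_minimum_moves_word.py | min_moves_to_minimal
-- ===== SOURCE A (Python) =====
-- def min_moves_to_minimal(word):
--     # Initialize minimum moves
--     min_moves = 0
--     # Initialize dictionary to store the last seen index of each character
--     last_seen = {}
--
--     # Iterate through each character in the word
--     for i, char in enumerate(word):
--         # Calculate the distance to the nearest occurrences on the left and right
--         left_dist = i - last_seen.get(char, -1)
--         right_dist = len(word) - i
--         # Update minimum moves
--         min_moves += min(left_dist, right_dist)
--         # Update the last seen index of the character
--         last_seen[char] = i
--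
--     return min_moves
-- ===== SOURCE B (Python) =====
-- def min_moves_to_minimal(word):
--     n = len(word)
--     # Group the indices of each character (in order of appearance).
--     positions = {}
--     for i, char in enumerate(word):
--         positions.setdefault(char, []).append(i)
--     total = 0
--     for idxs in positions.values():
--         prev = -1
--         for pos in idxs:
--             total += min(pos - prev, n - pos)
--             prev = pos
--     return total
-- ===== Notes on version B (the rewrite author's own statement) =====
-- stated objective: alternative
-- what changed: Instead of a single left-to-right pass keeping a rolling last-seen-index dict, B first groups the indices of each character into per-character lists and then sums min(pos - prev, n - pos) within each group with prev starting at -1.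
import Mathlib
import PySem

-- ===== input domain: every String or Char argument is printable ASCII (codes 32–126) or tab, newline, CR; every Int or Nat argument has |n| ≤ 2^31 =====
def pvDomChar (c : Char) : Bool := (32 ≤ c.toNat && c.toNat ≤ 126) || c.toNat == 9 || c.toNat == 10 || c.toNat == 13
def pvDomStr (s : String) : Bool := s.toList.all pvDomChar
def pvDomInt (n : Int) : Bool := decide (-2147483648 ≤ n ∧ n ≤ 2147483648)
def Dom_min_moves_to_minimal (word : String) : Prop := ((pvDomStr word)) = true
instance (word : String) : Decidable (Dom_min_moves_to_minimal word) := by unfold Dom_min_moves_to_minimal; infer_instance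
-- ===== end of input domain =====

-- B replaces A's single left-to-right pass with a rolling last-seen dict by a group-by-character
-- pass (per-character index lists, then a per-group sum); same O(n) cost, alternative decomposition.

-- ===== PORT A =====
-- loop body of A: st = (min_moves, last_seen), p = (i, char); n = len(word)
def pvStepA (n : Int) (st : Int × PySem.Dict Char Int) (p : Int × Char) : Int × PySem.Dict Char Int :=
  let left_dist := p.1 - st.2.getD p.2 (-1)
  let right_dist := n - p.1
  (st.1 + min left_dist right_dist, st.2.insert p.2 p.1)

def min_moves_to_minimal (word : String) : Int :=
  ((PySem.List.enumerate word.toList 0).foldl (pvStepA (PySem.Str.len word))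
    (0, PySem.Dict.empty)).1

-- ===== PORT B =====
-- grouping loop body of B: positions[char] = positions.get(char, []) + [i]
def pvGroup (d : PySem.Dict Char (List Int)) (p : Int × Char) : PySem.Dict Char (List Int) :=
  d.insert p.2 (d.getD p.2 [] ++ [p.1])

-- inner loop body of B: s = (total, prev)
def pvInner (n : Int) (s : Int × Int) (pos : Int) : Int × Int :=
  (s.1 + min (pos - s.2) (n - pos), pos)

-- outer loop body of B: one group, prev initialized to -1
def pvOuter (n : Int) (total : Int) (idxs : List Int) : Int :=
  (idxs.foldl (pvInner n) (total, -1)).1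

def min_moves_to_minimal_alt (word : String) : Int :=
  let n : Int := PySem.Str.len word
  let positions : PySem.Dict Char (List Int) :=
    (PySem.List.enumerate word.toList 0).foldl pvGroup PySem.Dict.empty
  positions.values.foldl (pvOuter n) 0

-- ===== PRECONDITION & SPEC =====
def Spec_min_moves_to_minimal (word : String) (out : Int) : Prop := out = min_moves_to_minimal_alt word
instance (word : String) (out : Int) : Decidable (Spec_min_moves_to_minimal word out) := by unfold Spec_min_moves_to_minimal; infer_instance

-- ===== CLAIM (what is proved, stated in full; the proofs are below) =====
def Claim_equal_min_moves_to_minimal : Prop := ∀ (word : String), Dom_min_moves_to_minimal word → Spec_min_moves_to_minimal word (min_moves_to_minimal word)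

-- ===== LEMMAS AND PROOFS =====

-- the contribution of one group (B's inner loop started at total = 0, prev = -1)
def pvG (n : Int) (idxs : List Int) : Int := (idxs.foldl (pvInner n) (0, -1)).1

lemma pv_inner_run (n : Int) (idxs : List Int) (t p : Int) :
    idxs.foldl (pvInner n) (t, p) = (t + (idxs.foldl (pvInner n) (0, p)).1, idxs.getLastD p) := by
  induction idxs generalizing t p with
  | nil => simp
  | cons x xs ih =>
    simp only [List.foldl_cons, pvInner, List.getLastD_cons]
    rw [ih, ih (0 + min (x - p) (n - x)) x]
    simp only [Prod.mk.injEq]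
    exact ⟨by ring, trivial⟩

lemma pv_outer_sum (n : Int) (ls : List (List Int)) (a : Int) :
    ls.foldl (pvOuter n) a = a + (ls.map (pvG n)).sum := by
  have h : pvOuter n = fun (acc : Int) (idxs : List Int) => acc + pvG n idxs := by
    funext acc idxs
    simp only [pvOuter, pvG]
    rw [pv_inner_run]
  rw [h, PySem.List.foldl_add]

lemma pvG_append (n m : Int) (xs : List Int) :
    pvG n (xs ++ [m]) = pvG n xs + min (m - xs.getLastD (-1)) (n - m) := by
  have h2 : (xs.foldl (pvInner n) (0, -1)).2 = xs.getLastD (-1) := by rw [pv_inner_run]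
  simp only [pvG, List.foldl_append, List.foldl_cons, List.foldl_nil, pvInner, h2]

-- inserting index m into the group of character c adds exactly that position's contribution
lemma pv_sum_insert (n m : Int) (c : Char) (items : List (Char × List Int))
    (hnd : (items.map (fun x => x.1)).Nodup) :
    (((PySem.Dict.mk items).insert c ((PySem.Dict.mk items).getD c [] ++ [m])).values.map (pvG n)).sum
      = (((PySem.Dict.mk items).values.map (pvG n)).sum)
        + min (m - (((PySem.Dict.mk items).getD c []).getLastD (-1))) (n - m) := by
  induction items with
  | nil =>
    simp [PySem.Dict.insert, PySem.Dict.contains, PySem.Dict.getD, PySem.Dict.get?,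
      PySem.Dict.values, pvG, pvInner]
  | cons kv rest ih =>
    obtain ⟨k, v⟩ := kv
    simp only [List.map_cons, List.nodup_cons] at hnd
    by_cases hkc : k = c
    · subst hkc
      -- head is the group of k; the tail contains no key k
      have htail : ∀ p ∈ rest, (p.1 == k) = false := by
        intro p hp
        simp only [beq_eq_false_iff_ne, ne_eq]
        intro h
        exact hnd.1 (h ▸ List.mem_map_of_mem hp)
      have hmap : ∀ w : List Int,
          rest.map (fun p => if p.1 = k then (k, w) else p) = rest := by
        intro w
        trans rest.map id
        · refine List.map_congr_left (fun p hp => ?_)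
          have hne := htail p hp
          simp only [beq_eq_false_iff_ne, ne_eq] at hne
          simp [hne]
        · exact List.map_id rest
      have hcont : (PySem.Dict.mk ((k, v) :: rest)).contains k = true := by
        simp [PySem.Dict.contains]
      have hins : ∀ w : List Int,
          (PySem.Dict.mk ((k, v) :: rest)).insert k w = PySem.Dict.mk ((k, w) :: rest) := by
        intro w
        simp [PySem.Dict.insert, hcont, hmap w]
      have hgetD : (PySem.Dict.mk ((k, v) :: rest)).getD k [] = v := by
        simp [PySem.Dict.getD, PySem.Dict.get?]
      rw [hgetD, hins (v ++ [m])]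
      simp only [PySem.Dict.values, List.map_cons, List.sum_cons]
      rw [pvG_append]
      ring
    · -- head untouched; recurse on the tail
      have hbeq : (k == c) = false := by simp [hkc]
      have hget : (PySem.Dict.mk ((k, v) :: rest)).getD c [] = (PySem.Dict.mk rest).getD c [] := by
        simp [PySem.Dict.getD, PySem.Dict.get?, hbeq]
      have hitems : ∀ w : List Int,
          ((PySem.Dict.mk ((k, v) :: rest)).insert c w).items
            = (k, v) :: ((PySem.Dict.mk rest).insert c w).items := by
        intro w
        simp only [PySem.Dict.insert, PySem.Dict.contains]
        by_cases hc : rest.any (fun p => p.1 == c) = true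
        · simp [List.any_cons, hc, hbeq, hkc]
        · simp [List.any_cons, hc, hbeq]
      rw [hget]
      simp only [PySem.Dict.values, hitems, List.map_cons, List.sum_cons]
      have hih := ih hnd.2
      simp only [PySem.Dict.values] at hih
      rw [hih]
      ring

-- pv_sum_insert restated for an arbitrary dict with distinct keys
lemma pv_sum_insert_d (n m : Int) (c : Char) (d : PySem.Dict Char (List Int))
    (h : d.keys.Nodup) :
    ((d.insert c (d.getD c [] ++ [m])).values.map (pvG n)).sum
      = ((d.values.map (pvG n)).sum) + min (m - ((d.getD c []).getLastD (-1))) (n - m) := by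
  obtain ⟨items⟩ := d
  exact pv_sum_insert n m c items (by simpa [PySem.Dict.keys] using h)

-- main invariant, by induction on the word from the right:
-- (1) A's running sum equals the sum of B's group contributions,
-- (2) A's last_seen entry for each character is the last element of its index group,
-- (3) the grouping dict has distinct keys.
lemma pv_main (cs : List Char) (n : Int) :
    (((PySem.List.enumerate cs 0).foldl (pvStepA n) (0, PySem.Dict.empty)).1
       = ((((PySem.List.enumerate cs 0).foldl pvGroup PySem.Dict.empty).values.map (pvG n)).sum))
    ∧ (∀ c : Char,
        ((PySem.List.enumerate cs 0).foldl (pvStepA n) (0, PySem.Dict.empty)).2.getD c (-1)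
          = ((((PySem.List.enumerate cs 0).foldl pvGroup PySem.Dict.empty).getD c []).getLastD (-1)))
    ∧ ((PySem.List.enumerate cs 0).foldl pvGroup PySem.Dict.empty).keys.Nodup := by
  induction cs using List.reverseRecOn with
  | nil =>
    refine ⟨by simp [PySem.Dict.values, PySem.Dict.empty], ?_,
      by simp [PySem.Dict.keys, PySem.Dict.empty]⟩
    intro c
    simp [PySem.Dict.getD, PySem.Dict.get?, PySem.Dict.empty]
  | append_singleton cs c ih =>
    obtain ⟨ih1, ih2, ih3⟩ := ih
    rw [PySem.List.enumerate_append]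
    simp only [PySem.List.enumerate_cons, PySem.List.enumerate_nil, List.foldl_append,
      List.foldl_cons, List.foldl_nil]
    refine ⟨?_, ?_, ?_⟩
    · simp only [pvStepA, pvGroup]
      rw [pv_sum_insert_d n (0 + (cs.length : Int)) c _ ih3, ih1, ih2 c]
    · intro c'
      by_cases hc : c' = c
      · subst hc
        simp [pvStepA, pvGroup, PySem.Dict.getD_insert_self]
      · simp only [pvStepA, pvGroup]
        rw [PySem.Dict.getD_insert_of_ne _ _ _ hc, PySem.Dict.getD_insert_of_ne _ _ _ hc]
        exact ih2 c'
    · exact PySem.Dict.nodup_keys_insert _ _ _ ih3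

-- ===== VERDICT (by name: the statement is the Claim_ definition above) =====
theorem min_moves_to_minimal_spec : Claim_equal_min_moves_to_minimal := by
  intro word _
  unfold Spec_min_moves_to_minimal min_moves_to_minimal min_moves_to_minimal_alt
  rw [pv_outer_sum]
  rw [(pv_main word.toList (PySem.Str.len word)).1]
  ring
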